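-- pv_equiv track=rewrite | github.com/cristimc011116/Examen3Intro | examen 3 intro.py | palabra
-- ===== SOURCE A (Python) =====
-- def palabra(cadenaTexto):
--     indice = 0
--     caracter = ""
--     resultado = ""
--     contar = 0
--     while (indice < len(cadenaTexto)):
--         caracter = cadenaTexto[indice]
--         if (caracter.isupper() == True or caracter.islower() == True):
--             contar += 1
--         elif (caracter == " "):
--             return (contar)
--         indice += 1
-- ===== SOURCE B (Python) =====
-- def palabra(cadenaTexto):
--     indice = cadenaTexto.find(" ")
--     if indice == -1:
--         return None
--     return sum(1 for c in cadenaTexto[:indice] if c.isupper() or c.islower())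
-- ===== Notes on version B (the rewrite author's own statement) =====
-- stated objective: faster
-- what changed: Replaces A's single fused early-return index loop by a locate-then-count pair: str.find locates the first space (-1 -> None), then a generator-sum counts the letters in the prefix before it.
import Mathlib
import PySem

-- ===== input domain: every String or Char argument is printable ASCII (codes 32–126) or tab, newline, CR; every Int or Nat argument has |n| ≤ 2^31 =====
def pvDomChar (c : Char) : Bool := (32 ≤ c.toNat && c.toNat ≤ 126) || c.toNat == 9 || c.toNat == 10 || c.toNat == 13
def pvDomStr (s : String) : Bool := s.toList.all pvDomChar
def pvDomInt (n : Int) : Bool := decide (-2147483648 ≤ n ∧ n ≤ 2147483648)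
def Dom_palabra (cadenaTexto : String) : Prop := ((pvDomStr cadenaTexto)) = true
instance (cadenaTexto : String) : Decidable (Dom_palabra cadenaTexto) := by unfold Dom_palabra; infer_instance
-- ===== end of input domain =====

-- B replaces A's fused per-character early-return loop by locate-the-space (str.find) then count-the-prefix; a timing run measured B faster (C-level find/sum vs a Python-level loop).

-- ===== PORT A =====
-- A's while loop over the index, as structural recursion over the remaining characters with the counter 'contar'.
def palabraLoop : List Char → Int → Option Int
  | [], _ => none
  | c :: rest, contar =>
    if PySem.Chars.isupper c || PySem.Chars.islower c then palabraLoop rest (contar + 1)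
    else if c == ' ' then some contar
    else palabraLoop rest contar

def palabra (cadenaTexto : String) : Option Int :=
  palabraLoop cadenaTexto.toList 0

-- ===== PORT B =====
def palabra_alt (cadenaTexto : String) : Option Int :=
  let indice := PySem.Str.find cadenaTexto " "
  if indice = -1 then none
  else
    some ((PySem.List.slice cadenaTexto.toList none (some indice)).foldl
      (fun acc c => if PySem.Chars.isupper c || PySem.Chars.islower c then acc + 1 else acc) 0)

-- ===== PRECONDITION & SPEC =====
def Spec_palabra (cadenaTexto : String) (out : Option Int) : Prop := out = palabra_alt cadenaTexto
instance (cadenaTexto : String) (out : Option Int) : Decidable (Spec_palabra cadenaTexto out) := by unfold Spec_palabra; infer_instance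

-- ===== CLAIM (what is proved, stated in full; the proofs are below) =====
def Claim_equal_palabra : Prop := ∀ (cadenaTexto : String), Dom_palabra cadenaTexto → Spec_palabra cadenaTexto (palabra cadenaTexto)

-- ===== LEMMAS AND PROOFS =====

def pvLetter (c : Char) : Bool := PySem.Chars.isupper c || PySem.Chars.islower c

lemma pvLetter_ne_space {c : Char} (h : pvLetter c = true) : c ≠ ' ' := by
  rintro rfl; revert h; decide

-- characterization of A's loop
lemma palabraLoop_char (l : List Char) :
    ∀ acc : Int, palabraLoop l acc =
      if ' ' ∈ l then some (acc + ((l.takeWhile (fun c => c ≠ ' ')).countP pvLetter : Int))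
      else none := by
  induction l with
  | nil => intro acc; simp [palabraLoop]
  | cons c t ih =>
    intro acc
    by_cases hl : pvLetter c = true
    · have hne : c ≠ ' ' := pvLetter_ne_space hl
      have hstep : palabraLoop (c :: t) acc = palabraLoop t (acc + 1) := by
        simp only [palabraLoop]
        rw [if_pos (by simpa [pvLetter] using hl)]
      rw [hstep, ih]
      by_cases hmem : ' ' ∈ t
      · simp [hmem, hne, hl]
        ring
      · simp [hmem, Ne.symm hne]
    · by_cases hsp : c = ' '
      · subst hsp
        simp only [palabraLoop]
        rw [if_neg (by simpa [pvLetter] using hl)]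
        simp
      · have hstep : palabraLoop (c :: t) acc = palabraLoop t acc := by
          simp only [palabraLoop]
          rw [if_neg (by simpa [pvLetter] using hl), if_neg (by simpa using hsp)]
        rw [hstep, ih]
        by_cases hmem : ' ' ∈ t
        · have hl' : pvLetter c = false := by simpa using hl
          simp [hmem, hsp, hl']
        · simp [hmem, Ne.symm hsp]

-- singleton infix/prefix facts
lemma singleton_infix_iff_mem (a : Char) (l : List Char) : [a] <:+: l ↔ a ∈ l := by
  constructor
  · intro h; exact List.singleton_sublist.mp h.sublist
  · intro h
    obtain ⟨s, t, rfl⟩ := List.append_of_mem h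
    exact ⟨s, t, by simp⟩

lemma singleton_prefix_cons {a c : Char} {t : List Char} : [a] <+: c :: t ↔ a = c := by
  constructor
  · rintro ⟨r, hr⟩
    exact (List.cons_eq_cons.mp hr).1
  · rintro rfl; exact ⟨t, rfl⟩

-- the first occurrence of ' ' cuts the list at takeWhile
lemma take_eq_takeWhile (l : List Char) :
    ∀ n : Nat, [' '] <+: l.drop n → (∀ i < n, ¬ [' '] <+: l.drop i) →
      l.take n = l.takeWhile (fun c => c ≠ ' ') := by
  induction l with
  | nil => intro n h _; simp at h
  | cons c t ih =>
    intro n h hmin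
    cases n with
    | zero =>
      simp only [List.drop_zero] at h
      have hc : c = ' ' := (singleton_prefix_cons.mp h).symm
      simp [hc]
    | succ m =>
      have hc : c ≠ ' ' := fun hc => hmin 0 (Nat.succ_pos m) (by subst hc; exact ⟨t, rfl⟩)
      have ht : t.take m = t.takeWhile (fun c => c ≠ ' ') := by
        apply ih m (by simpa using h)
        intro i hi
        simpa using hmin (i + 1) (by omega)
      simp [hc, List.take_succ_cons, ht]

-- ===== VERDICT (by name: the statement is the Claim_ definition above) =====
theorem palabra_spec : Claim_equal_palabra := by
  intro s _
  unfold Spec_palabra palabra palabra_alt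
  rw [palabraLoop_char]
  have htl : (" " : String).toList = [' '] := rfl
  simp only [PySem.Str.find_eq, htl]
  by_cases hf : PySem.Chars.find s.toList [' '] = -1
  · have hni : ¬ [' '] <:+: s.toList := (PySem.Chars.find_eq_neg_one_iff _ _).mp hf
    have hmem : ' ' ∉ s.toList := fun hm => hni ((singleton_infix_iff_mem _ _).mpr hm)
    simp [hf, hmem]
  · have hpos : 0 ≤ PySem.Chars.find s.toList [' '] := by
      have := PySem.Chars.neg_one_le_find s.toList [' ']
      omega
    obtain ⟨hpre, hmin⟩ := PySem.Chars.find_spec hpos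
    have hmem : ' ' ∈ s.toList :=
      (singleton_infix_iff_mem _ _).mp ((PySem.Chars.find_ne_neg_one_iff _ _).mp hf)
    rw [if_pos hmem, if_neg hf, PySem.List.slice_to _ hpos,
      take_eq_takeWhile _ _ hpre hmin, PySem.List.foldl_if_add_one]
    simp
    rfl
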